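-- pv_equiv track=rewrite | github.com/waterfox-dev/TopTweetBot | source/text_to_image.py | transform
-- ===== SOURCE A (Python) =====
-- def transform(text, author):
--     text = list(text)
--     lign_return = 0
--     for element in range(len(text)) :
--         if (element > 40 and element < 50 and text[element] == " " and lign_return == 0) :
--             text[element] = '\n'
--             lign_return += 1
--         elif (element > 80 and element < 90 and text[element] == " "  and lign_return == 1) :
--             text[element] = '\n'
--             lign_return += 1
--         elif (element > 130 and element < 140 and text[element] == " "  and lign_return == 2) :
--             text[element] = '\n'
--             lign_return += 1
--         elif (element > 170 and element < 180 and text[element] == " "  and lign_return == 3) :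
--             text[element] = '\n'
--             lign_return += 1
--         elif (element > 220 and element < 230 and text[element] == " "  and lign_return == 4) :
--             text[element] = '\n'
--             lign_return += 1
--         elif (element > 260 and element < 270 and text[element] == " "  and lign_return == 5) :
--             text[element] = '\n'
--             lign_return += 1
--
--     new_text = ""
--     for element in text :
--         new_text += element
--
--     link_indice = new_text.find("https://t.co/")
--     new_text = new_text[:link_indice]
--     new_text += f"\n \n \nAuthor : {author}"
--
--     return new_text
-- ===== SOURCE B (Python) =====
-- WINDOWS = [(41, 50), (81, 90), (131, 140), (171, 180), (221, 230), (261, 270)]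
--
-- def transform(text, author):
--     chars = list(text)
--     for start, end in WINDOWS:
--         hit = next((i for i in range(start, min(end, len(chars))) if chars[i] == " "), None)
--         if hit is None:
--             break
--         chars[hit] = "\n"
--     new_text = "".join(chars)
--     link_indice = new_text.find("https://t.co/")
--     new_text = new_text[:link_indice]
--     return new_text + f"\n \n \nAuthor : {author}"
-- ===== Notes on version B (the rewrite author's own statement) =====
-- stated objective: simpler
-- what changed: Replaces the single pass over all indices with six counter-gated elif branches by a loop over an explicit list of six (start,end) windows that scans only each window's at-most-nine indices for its first space and breaks when a window has none.
import Mathlib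
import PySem

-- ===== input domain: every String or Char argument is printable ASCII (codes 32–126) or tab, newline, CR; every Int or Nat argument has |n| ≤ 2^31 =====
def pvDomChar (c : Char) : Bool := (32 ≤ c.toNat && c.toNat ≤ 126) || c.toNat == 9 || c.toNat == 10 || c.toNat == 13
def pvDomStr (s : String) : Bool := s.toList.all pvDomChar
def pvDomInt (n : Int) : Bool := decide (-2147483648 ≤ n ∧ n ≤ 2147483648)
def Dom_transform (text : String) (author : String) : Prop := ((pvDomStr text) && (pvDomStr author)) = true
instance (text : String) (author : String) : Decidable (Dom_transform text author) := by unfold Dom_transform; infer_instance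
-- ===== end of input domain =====

-- B replaces A's single indexed pass with six counter-gated elif branches by a loop over an
-- explicit list of (start,end) windows, scanning each for its first space (objective: simpler).

-- ===== PORT A =====
-- one iteration of A's for-loop: the six elif branches, in source order
-- (the index is always in range, so text[element] is read with getD; lign_return is 0..6, kept as Nat)
def pvStepA (st : List Char × Nat) (element : Nat) : List Char × Nat :=
  let text := st.1
  let lign_return := st.2
  if 40 < element ∧ element < 50 ∧ text.getD element '\x00' = ' ' ∧ lign_return = 0 then
    (text.set element '\n', lign_return + 1)
  else if 80 < element ∧ element < 90 ∧ text.getD element '\x00' = ' ' ∧ lign_return = 1 then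
    (text.set element '\n', lign_return + 1)
  else if 130 < element ∧ element < 140 ∧ text.getD element '\x00' = ' ' ∧ lign_return = 2 then
    (text.set element '\n', lign_return + 1)
  else if 170 < element ∧ element < 180 ∧ text.getD element '\x00' = ' ' ∧ lign_return = 3 then
    (text.set element '\n', lign_return + 1)
  else if 220 < element ∧ element < 230 ∧ text.getD element '\x00' = ' ' ∧ lign_return = 4 then
    (text.set element '\n', lign_return + 1)
  else if 260 < element ∧ element < 270 ∧ text.getD element '\x00' = ' ' ∧ lign_return = 5 then
    (text.set element '\n', lign_return + 1)
  else (text, lign_return)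

def transform (text : String) (author : String) : String :=
  let cs := text.toList
  let r := (List.range cs.length).foldl pvStepA (cs, 0)
  -- new_text = "" ; for element in text: new_text += element
  let new_text := r.1.foldl (fun acc c => acc ++ [c]) ([] : List Char)
  let link_indice := PySem.Chars.find new_text "https://t.co/".toList
  let truncated := PySem.List.slice new_text none (some link_indice)
  String.ofList (truncated ++ ("\n \n \nAuthor : ".toList ++ author.toList))

-- ===== PORT B =====
def pvWindows : List (Nat × Nat) := [(41, 50), (81, 90), (131, 140), (171, 180), (221, 230), (261, 270)]

-- first index i in [i, e) with cs[i] == ' '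
def pvFindSpace (cs : List Char) (i e : Nat) : Option Nat :=
  if i < e then
    if cs.getD i '\x00' = ' ' then some i else pvFindSpace cs (i + 1) e
  else none
termination_by e - i

def pvProcWins : List (Nat × Nat) → List Char → List Char
  | [], cs => cs
  | (s, e) :: ws, cs =>
    match pvFindSpace cs s (min e cs.length) with
    | none => cs
    | some i => pvProcWins ws (cs.set i '\n')

def transform_alt (text : String) (author : String) : String :=
  let chars := pvProcWins pvWindows text.toList
  let link_indice := PySem.Chars.find chars "https://t.co/".toList
  let new_text := PySem.List.slice chars none (some link_indice)
  String.ofList (new_text ++ ("\n \n \nAuthor : ".toList ++ author.toList))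

-- ===== PRECONDITION & SPEC =====
def Spec_transform (text : String) (author : String) (out : String) : Prop := out = transform_alt text author
instance (text : String) (author : String) (out : String) : Decidable (Spec_transform text author out) := by unfold Spec_transform; infer_instance

-- ===== CLAIM (what is proved, stated in full; the proofs are below) =====
def Claim_equal_transform : Prop := ∀ (text : String) (author : String), Dom_transform text author → Spec_transform text author (transform text author)

-- ===== LEMMAS AND PROOFS =====

-- window starts / exclusive ends, indexed by A's lign_return counter
def pvWS (k : Nat) : Nat := [41, 81, 131, 171, 221, 261].getD k 270
def pvWE (k : Nat) : Nat := [50, 90, 140, 180, 230, 270].getD k 270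

lemma pvStepA_eq (cs : List Char) (k m : Nat) :
    pvStepA (cs, k) m =
      if k < 6 ∧ pvWS k ≤ m ∧ m < pvWE k ∧ cs.getD m '\x00' = ' ' then
        (cs.set m '\n', k + 1)
      else (cs, k) := by
  simp only [List.getD] at *
  by_cases hsp : cs[m]?.getD '\x00' = ' '
  · rcases k with _|_|_|_|_|_|k <;> simp [pvStepA, pvWS, pvWE, hsp] <;>
      split_ifs <;> first | rfl | omega
  · simp [pvStepA, pvWS, pvWE, hsp]

lemma pvFindSpace_none (cs : List Char) {i e : Nat} (h : e ≤ i) :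
    pvFindSpace cs i e = none := by
  rw [pvFindSpace]; simp [Nat.not_lt.mpr h]

lemma pvFindSpace_hit (cs : List Char) {i e : Nat} (h : i < e)
    (hc : cs.getD i '\x00' = ' ') : pvFindSpace cs i e = some i := by
  rw [pvFindSpace, if_pos h, if_pos hc]

lemma pvFindSpace_skip (cs : List Char) {i e : Nat} (h : i < e)
    (hc : cs.getD i '\x00' ≠ ' ') : pvFindSpace cs i e = pvFindSpace cs (i + 1) e := by
  rw [pvFindSpace, if_pos h, if_neg hc]

-- the value A's loop computes from position m onward while the counter is k
def pvPhase (m k : Nat) (cs : List Char) : List Char :=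
  if k < 6 then
    match pvFindSpace cs (max m (pvWS k)) (min (pvWE k) cs.length) with
    | none => cs
    | some i => pvProcWins (pvWindows.drop (k + 1)) (cs.set i '\n')
  else cs

lemma pvPhase_eq_procWins (k : Nat) (cs : List Char) (m : Nat)
    (hk : k ≤ 6) (hm : m ≤ pvWS k) :
    pvPhase m k cs = pvProcWins (pvWindows.drop k) cs := by
  interval_cases k <;>
    simp_all [pvPhase, pvWS, pvWE, pvWindows, pvProcWins]

lemma pvWE_le_wS_succ {k : Nat} (hk : k < 6) : pvWE k ≤ pvWS (k + 1) := by
  interval_cases k <;> decide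

lemma pvPhase_of_len_le (m k : Nat) (cs : List Char) (h : cs.length ≤ m) :
    pvPhase m k cs = cs := by
  unfold pvPhase
  split
  · rw [pvFindSpace_none cs (by omega)]
  · rfl

lemma pvMain : ∀ (fuel m k : Nat) (cs : List Char), cs.length ≤ m + fuel →
    ((List.range' m (cs.length - m)).foldl pvStepA (cs, k)).1 = pvPhase m k cs := by
  intro fuel
  induction fuel with
  | zero =>
    intro m k cs h
    rw [Nat.sub_eq_zero_of_le (by omega), pvPhase_of_len_le m k cs (by omega)]
    rfl
  | succ fuel ih =>
    intro m k cs h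
    rcases Nat.lt_or_ge m cs.length with hm | hm
    · have hrange : cs.length - m = (cs.length - (m + 1)) + 1 := by omega
      rw [hrange, List.range'_succ, List.foldl_cons, pvStepA_eq]
      split_ifs with hc
      · obtain ⟨hk6, hs, he, hsp⟩ := hc
        have hlen : (cs.set m '\n').length = cs.length := by simp
        have := ih (m + 1) (k + 1) (cs.set m '\n') (by omega)
        rw [hlen] at this
        rw [this]
        rw [pvPhase_eq_procWins (k + 1) _ (m + 1) (by omega)
          (by have := pvWE_le_wS_succ hk6; omega)]
        unfold pvPhase
        rw [if_pos hk6, Nat.max_eq_left hs,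
          pvFindSpace_hit cs (by omega) hsp]
      · have := ih (m + 1) k cs (by omega)
        rw [this]
        unfold pvPhase
        split
        next hk6 =>
          rcases Nat.lt_or_ge m (pvWS k) with h1 | h1
          · rw [Nat.max_eq_right (by omega), Nat.max_eq_right (by omega)]
          · rcases Nat.lt_or_ge m (pvWE k) with h2 | h2
            · have hsp : cs.getD m '\x00' ≠ ' ' := by
                intro hx; exact hc ⟨hk6, h1, h2, hx⟩
              rw [Nat.max_eq_left h1, Nat.max_eq_left (by omega),
                pvFindSpace_skip cs (by omega) hsp]
            · rw [pvFindSpace_none cs (by omega), pvFindSpace_none cs (by omega)]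
        next => rfl
    · rw [Nat.sub_eq_zero_of_le hm, pvPhase_of_len_le m k cs hm]
      rfl

lemma pvFoldA (cs : List Char) :
    ((List.range cs.length).foldl pvStepA (cs, 0)).1 = pvProcWins pvWindows cs := by
  rw [List.range_eq_range']
  have := pvMain cs.length 0 0 cs (by omega)
  rw [Nat.sub_zero] at this
  rw [this, pvPhase_eq_procWins 0 cs 0 (by omega) (by decide)]
  rfl

-- ===== VERDICT (by name: the statement is the Claim_ definition above) =====
theorem transform_spec : Claim_equal_transform := by
  intro text author _
  unfold Spec_transform transform transform_alt
  simp only [pvFoldA, PySem.List.foldl_append_singleton, List.nil_append]
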